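-- pv_equiv track=rewrite | github.com/kmylpenter/KFG-Addons | addons/ccv3-polish-translation/apply-translations.py | find_matching_polish_keywords
-- ===== SOURCE A (Python) =====
-- def find_matching_polish_keywords(english_keywords: list[str], mapping: dict) -> list[str]:
--     """Find Polish equivalents for English keywords."""
--     polish_keywords = []
--
--     for eng_keyword in english_keywords:
--         eng_lower = eng_keyword.lower()
--
--         # Check each mapping entry
--         for eng_word, polish_forms in mapping.items():
--             # Direct match or word is part of keyword
--             if eng_word in eng_lower or eng_lower in eng_word:
--                 polish_keywords.extend(polish_forms)
--             # Check if any Polish form might already be there (avoid duplicates)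
--             elif any(pf.lower() in eng_lower for pf in polish_forms[:2]):
--                 continue
--
--     # Remove duplicates while preserving order
--     seen = set()
--     unique_polish = []
--     for kw in polish_keywords:
--         kw_lower = kw.lower()
--         if kw_lower not in seen:
--             seen.add(kw_lower)
--             unique_polish.append(kw)
--
--     return unique_polish
-- ===== SOURCE B (Python) =====
-- def find_matching_polish_keywords(english_keywords: list[str], mapping: dict) -> list[str]:
--     """Find Polish equivalents for English keywords.
--
--     Entry-major strategy: for each mapping entry, find the FIRST keyword it
--     matches (early break), then order the matched entries by (first keyword
--     index, entry index) with a stable sort and emit their Polish forms,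
--     deduplicating case-insensitively on first occurrence.  This yields the
--     same first-occurrence order as the keyword-major nested scan, because a
--     form's first appearance is at its entry's earliest matching keyword.
--     """
--     lowers = [kw.lower() for kw in english_keywords]
--     matched = []
--     for j, (eng_word, polish_forms) in enumerate(mapping.items()):
--         for i, el in enumerate(lowers):
--             if eng_word in el or el in eng_word:
--                 matched.append((i, j, polish_forms))
--                 break
--     matched.sort(key=lambda t: (t[0], t[1]))
--     seen = set()
--     unique_polish = []
--     for _i, _j, polish_forms in matched:
--         for pf in polish_forms:
--             pf_lower = pf.lower()
--             if pf_lower not in seen: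
--                 seen.add(pf_lower)
--                 unique_polish.append(pf)
--     return unique_polish
-- ===== Notes on version B (the rewrite author's own statement) =====
-- stated objective: faster
-- what changed: B inverts the loop nesting: an entry-major scan finds each mapping entry's FIRST matching keyword and breaks early, a stable sort of the matched entries by (first-keyword-index, entry-index) reconstructs A's keyword-major emission order, and one dedup pass emits each entry's forms once; correct because a form's first occurrence in A's stream is at its entry's earliest matching keyword.
import Mathlib
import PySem

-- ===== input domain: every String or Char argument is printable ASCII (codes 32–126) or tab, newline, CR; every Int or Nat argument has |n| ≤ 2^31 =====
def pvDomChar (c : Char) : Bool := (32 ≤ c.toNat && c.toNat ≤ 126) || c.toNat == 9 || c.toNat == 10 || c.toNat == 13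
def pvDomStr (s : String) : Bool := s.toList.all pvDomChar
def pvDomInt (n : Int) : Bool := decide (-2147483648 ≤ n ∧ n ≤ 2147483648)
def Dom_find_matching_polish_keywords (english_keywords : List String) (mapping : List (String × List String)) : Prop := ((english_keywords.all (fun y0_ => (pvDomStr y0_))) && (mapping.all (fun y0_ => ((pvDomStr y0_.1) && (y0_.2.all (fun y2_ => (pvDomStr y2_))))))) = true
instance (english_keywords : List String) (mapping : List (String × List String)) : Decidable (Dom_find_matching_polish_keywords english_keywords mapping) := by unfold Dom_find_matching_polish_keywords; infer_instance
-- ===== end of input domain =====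

-- B inverts the loop nesting (entry-major with early break), recovers A's keyword-major
-- emission order with a stable sort by (first matching keyword index, entry index), then
-- deduplicates once, emitting each matched entry's forms a single time (measured faster).

-- ===== PORT A =====
-- one step of A's inner `for eng_word, polish_forms in mapping.items()` loop
def pvA_matchStep (eng_lower : String) (acc : List String) (entry : String × List String) : List String :=
  if PySem.Str.isIn entry.1 eng_lower || PySem.Str.isIn eng_lower entry.1 then
    acc ++ entry.2
  else if (entry.2.take 2).any (fun pf => PySem.Str.isIn (PySem.Str.lower pf) eng_lower) then
    acc  -- `continue`: no effect on the accumulator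
  else
    acc

-- A's first phase: build polish_keywords
def pvA_collect (english_keywords : List String) (mapping : List (String × List String)) : List String :=
  english_keywords.foldl (fun acc eng_keyword =>
    mapping.foldl (pvA_matchStep (PySem.Str.lower eng_keyword)) acc) []

-- one step of A's dedup loop over polish_keywords (state = (seen, unique_polish))
def pvA_dedupStep (st : PySem.Set String × List String) (kw : String) : PySem.Set String × List String :=
  let kw_lower := PySem.Str.lower kw
  if PySem.Set.contains st.1 kw_lower then st
  else (PySem.Set.add st.1 kw_lower, st.2 ++ [kw])

def find_matching_polish_keywords (english_keywords : List String) (mapping : List (String × List String)) : List String :=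
  (List.foldl pvA_dedupStep (PySem.Set.empty, []) (pvA_collect english_keywords mapping)).2

-- ===== PORT B =====
-- B's bidirectional substring test `eng_word in el or el in eng_word`
def pvMatch (w el : String) : Bool := PySem.Str.isIn w el || PySem.Str.isIn el w

-- B's inner `for i, el in enumerate(lowers): … break` loop: first matching keyword index
def pvB_firstIdx (w : String) : List (Int × String) → Option Int
  | [] => none
  | p :: rest => if pvMatch w p.2 then some p.1 else pvB_firstIdx w rest

-- B's `for pf in polish_forms` body in the final dedup pass (state = (seen, unique_polish))
def pvB_addStep (st : PySem.Set String × List String) (pf : String) : PySem.Set String × List String :=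
  let pf_lower := PySem.Str.lower pf
  if PySem.Set.contains st.1 pf_lower then st
  else (PySem.Set.add st.1 pf_lower, st.2 ++ [pf])

def find_matching_polish_keywords_alt (english_keywords : List String) (mapping : List (String × List String)) : List String :=
  let lowers := english_keywords.map PySem.Str.lower
  let matched := (PySem.List.enumerate mapping).foldl (fun acc je =>
      match pvB_firstIdx je.2.1 (PySem.List.enumerate lowers) with
      | some i => acc ++ [(i, je.1, je.2.2)]
      | none => acc) []
  let sortedM := PySem.List.sorted2 matched (fun t => t.1) (fun t => t.2.1) false
  (sortedM.foldl (fun st t => t.2.2.foldl pvB_addStep st) (PySem.Set.empty, [])).2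

-- ===== PRECONDITION & SPEC =====
def Spec_find_matching_polish_keywords (english_keywords : List String) (mapping : List (String × List String)) (out : List String) : Prop := out = find_matching_polish_keywords_alt english_keywords mapping
instance (english_keywords : List String) (mapping : List (String × List String)) (out : List String) : Decidable (Spec_find_matching_polish_keywords english_keywords mapping out) := by unfold Spec_find_matching_polish_keywords; infer_instance

-- ===== CLAIM (what is proved, stated in full; the proofs are below) =====
def Claim_equal_find_matching_polish_keywords : Prop := ∀ (english_keywords : List String) (mapping : List (String × List String)), Dom_find_matching_polish_keywords english_keywords mapping → Spec_find_matching_polish_keywords english_keywords mapping (find_matching_polish_keywords english_keywords mapping)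

-- ===== LEMMAS AND PROOFS =====

-- Abbreviations used only by the proofs
abbrev pvSt := PySem.Set String × List String
def pvRun (st : pvSt) (s : List String) : pvSt := List.foldl pvB_addStep st s
-- first matching keyword index of entry key w against the lowered keywords L
def pvF (L : List String) (w : String) : Option Int := pvB_firstIdx w (PySem.List.enumerate L)
-- the forms A appends while processing one (lowered) keyword el
def pvAblk (M : List (String × List String)) (el : String) : List String :=
  M.flatMap (fun e => if pvMatch e.1 el then e.2 else [])
-- closed form of B's `matched` list
def pvMatched (L : List String) (M : List (String × List String)) : List (Int × Int × List String) :=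
  (PySem.List.enumerate M).filterMap (fun je => (pvF L je.2.1).map (fun i => (i, je.1, je.2.2)))
-- the forms B emits for first-match index s
def pvBblk (L : List String) (M : List (String × List String)) (s : Nat) : List String :=
  M.flatMap (fun e => if pvF L e.1 = some (s : Int) then e.2 else [])
-- B's whole stream from keyword index s on
def pvBside (L : List String) (M : List (String × List String)) : List String → Nat → List String
  | [], _ => []
  | _ :: R', s => pvBblk L M s ++ pvBside L M R' (s + 1)
-- invariant: every entry first-matched before keyword index s has all its lowered forms in seen
def pvInv (L : List String) (M : List (String × List String)) (st : pvSt) (s : Int) : Prop :=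
  ∀ t ∈ pvMatched L M, t.1 < s → ∀ pf ∈ t.2.2, PySem.Set.contains st.1 (PySem.Str.lower pf) = true

-- ---- dedup-state basics ----
theorem pv_contains_add_of (s : PySem.Set String) (x y : String)
    (h : PySem.Set.contains s y = true) : PySem.Set.contains (PySem.Set.add s x) y = true := by
  simp only [PySem.Set.add]
  split
  · exact h
  · simp_all [PySem.Set.contains]

theorem pv_contains_add_self (s : PySem.Set String) (x : String) :
    PySem.Set.contains (PySem.Set.add s x) x = true := by
  simp only [PySem.Set.add]
  split
  · assumption
  · simp [PySem.Set.contains]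

theorem pv_mono (st : pvSt) (s : List String) (y : String)
    (h : PySem.Set.contains st.1 y = true) : PySem.Set.contains (pvRun st s).1 y = true := by
  induction s generalizing st with
  | nil => exact h
  | cons a s ih =>
    simp only [pvRun, List.foldl_cons]
    apply ih
    unfold pvB_addStep
    dsimp only
    split
    · exact h
    · exact pv_contains_add_of st.1 (PySem.Str.lower a) y h

theorem pv_abs (st : pvSt) (s : List String) :
    (∀ x ∈ s, PySem.Set.contains st.1 (PySem.Str.lower x) = true) → pvRun st s = st := by
  induction s with
  | nil => intro _; rfl
  | cons a s ih =>
    intro h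
    have ha := h a (by simp)
    simp only [pvRun, List.foldl_cons]
    rw [show pvB_addStep st a = st from by unfold pvB_addStep; dsimp only; rw [if_pos ha]]
    exact ih (fun x hx => h x (by simp [hx]))

theorem pv_gain (st : pvSt) (s : List String) (x : String) (hx : x ∈ s) :
    PySem.Set.contains (pvRun st s).1 (PySem.Str.lower x) = true := by
  induction s generalizing st with
  | nil => cases hx
  | cons a s ih =>
    simp only [pvRun, List.foldl_cons]
    rcases List.mem_cons.mp hx with rfl | hx'
    · apply pv_mono
      unfold pvB_addStep
      dsimp only
      split
      next hcond => exact hcond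
      next => exact pv_contains_add_self st.1 (PySem.Str.lower x)
    · exact ih _ hx'

-- ---- stream shapes ----
theorem pvA_matchStep_eq (el : String) (acc : List String) (e : String × List String) :
    pvA_matchStep el acc e = acc ++ (if pvMatch e.1 el then e.2 else []) := by
  unfold pvA_matchStep pvMatch
  split_ifs <;> simp_all

theorem pvA_collect_eq (ek : List String) (M : List (String × List String)) :
    pvA_collect ek M = (ek.map PySem.Str.lower).flatMap (pvAblk M) := by
  unfold pvA_collect
  have inner : ∀ el, pvA_matchStep el = fun acc e => acc ++ (if pvMatch e.1 el then e.2 else []) :=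
    fun el => funext fun acc => funext fun e => pvA_matchStep_eq el acc e
  have houter : (fun (acc : List String) kw => M.foldl (pvA_matchStep (PySem.Str.lower kw)) acc)
      = fun acc kw => acc ++ pvAblk M (PySem.Str.lower kw) := by
    funext acc kw
    rw [inner, PySem.List.foldl_append_eq_flatMap]
    rfl
  rw [houter, PySem.List.foldl_append_eq_flatMap, List.nil_append, List.flatMap_map]

theorem pv_foldl_matched (L' : List String) (jM : List (Int × (String × List String)))
    (acc : List (Int × Int × List String)) :
    jM.foldl (fun acc je => match pvB_firstIdx je.2.1 (PySem.List.enumerate L') with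
        | some i => acc ++ [(i, je.1, je.2.2)]
        | none => acc) acc
      = acc ++ jM.filterMap (fun je => (pvF L' je.2.1).map (fun i => (i, je.1, je.2.2))) := by
  induction jM generalizing acc with
  | nil => simp
  | cons je jM ih =>
    simp only [List.foldl_cons, List.filterMap_cons]
    cases hg : pvB_firstIdx je.2.1 (PySem.List.enumerate L') with
    | none =>
      have hg' : pvF L' je.2.1 = none := hg
      simp [hg', ih]
    | some i =>
      have hg' : pvF L' je.2.1 = some i := hg
      simp [hg', ih]

theorem pv_foldl_nested (ts : List (Int × Int × List String)) (st : pvSt) :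
    ts.foldl (fun st t => t.2.2.foldl pvB_addStep st) st
      = List.foldl pvB_addStep st (ts.flatMap (fun t => t.2.2)) := by
  induction ts generalizing st with
  | nil => rfl
  | cons t ts ih => simp only [List.foldl_cons, List.flatMap_cons, List.foldl_append, ih]

-- ---- pvB_firstIdx facts ----
theorem pvF_some (w : String) (R : List String) (s i : Int)
    (h : pvB_firstIdx w (PySem.List.enumerate R s) = some i) :
    ∃ k, ∃ _h : k < R.length, i = s + k ∧ pvMatch w R[k] = true := by
  induction R generalizing s with
  | nil => simp [PySem.List.enumerate, pvB_firstIdx] at h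
  | cons a R ih =>
    rw [PySem.List.enumerate_cons] at h
    by_cases hm : pvMatch w a = true
    · refine ⟨0, by simp, ?_, hm⟩
      simp [pvB_firstIdx, hm] at h
      omega
    · simp only [pvB_firstIdx, hm, if_false, Bool.false_eq_true] at h
      obtain ⟨k, hk, hi, hmk⟩ := ih (s + 1) h
      exact ⟨k + 1, by simpa using hk, by push_cast at hi ⊢; omega, by simpa using hmk⟩

theorem pvF_le_of_match (w : String) (R : List String) (s : Int) (k : Nat)
    (hk : k < R.length) (h : pvMatch w R[k] = true) :
    ∃ i, pvB_firstIdx w (PySem.List.enumerate R s) = some i ∧ i ≤ s + k := by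
  induction R generalizing s k with
  | nil => simp at hk
  | cons a R ih =>
    rw [PySem.List.enumerate_cons]
    by_cases hm : pvMatch w a = true
    · exact ⟨s, by simp [pvB_firstIdx, hm], by omega⟩
    · cases k with
      | zero => exact absurd h hm
      | succ k =>
        obtain ⟨i, hi, hle⟩ := ih (s + 1) k (by simpa using hk) (by simpa using h)
        refine ⟨i, by simp [pvB_firstIdx, hm, hi], by push_cast at hle ⊢; omega⟩

-- ---- matched facts ----
theorem pv_mem_matched (L : List String) (M : List (String × List String))
    (e : String × List String) (he : e ∈ M) (i : Int) (hf : pvF L e.1 = some i) :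
    ∃ j, (i, j, e.2) ∈ pvMatched L M := by
  obtain ⟨k, hk, hek⟩ := List.mem_iff_getElem.mp he
  refine ⟨(0 : Int) + k, ?_⟩
  unfold pvMatched
  rw [List.mem_filterMap]
  refine ⟨((0 : Int) + k, e), ?_, ?_⟩
  · rw [PySem.List.mem_enumerate_iff]
    exact ⟨k, hk, by rw [hek]⟩
  · simp [hf]

theorem pv_matched_mem (L : List String) (M : List (String × List String))
    (t : Int × Int × List String) (ht : t ∈ pvMatched L M) :
    ∃ e ∈ M, pvF L e.1 = some t.1 ∧ t.2.2 = e.2 := by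
  unfold pvMatched at ht
  rw [List.mem_filterMap] at ht
  obtain ⟨je, hje, hf⟩ := ht
  rw [PySem.List.mem_enumerate_iff] at hje
  obtain ⟨k, hk, rfl⟩ := hje
  cases hF : pvF L M[k].1 with
  | none => simp [hF] at hf
  | some i =>
    simp only [hF, Option.map_some, Option.some_inj] at hf
    refine ⟨M[k], List.getElem_mem hk, ?_, ?_⟩
    · rw [← hf]
      simpa using hF
    · rw [← hf]

theorem pv_filter_filterMap (L : List String) (s : Nat)
    (jM : List (Int × (String × List String))) :
    ((jM.filterMap (fun je => (pvF L je.2.1).map (fun i => (i, je.1, je.2.2)))).filter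
        (fun t => t.1 = (s : Int))).flatMap (fun t => t.2.2)
      = (jM.map (fun je => je.2)).flatMap
          (fun e => if pvF L e.1 = some (s : Int) then e.2 else []) := by
  induction jM with
  | nil => simp
  | cons je jM ih =>
    simp only [List.filterMap_cons, List.map_cons, List.flatMap_cons]
    cases hF : pvF L je.2.1 with
    | none => simp [hF, ih]
    | some i =>
      by_cases his : i = (s : Int)
      · subst his
        simp [List.filter_cons, ih]
      · simp only [hF, Option.map_some, List.filter_cons]
        rw [if_neg (by simpa using his), if_neg (by simp [his]), List.nil_append, ih]

theorem pv_filter_matched_flat (L : List String) (M : List (String × List String)) (s : Nat) :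
    ((pvMatched L M).filter (fun t => t.1 = (s : Int))).flatMap (fun t => t.2.2)
      = pvBblk L M s := by
  unfold pvMatched pvBblk
  rw [pv_filter_filterMap, PySem.List.map_snd_enumerate]

-- ---- invariant propagation ----
theorem pvInv_mono (L : List String) (M : List (String × List String)) (st : pvSt) (s : Int)
    (xs : List String) (h : pvInv L M st s) : pvInv L M (pvRun st xs) s :=
  fun t ht hlt pf hpf => pv_mono st xs _ (h t ht hlt pf hpf)

-- ---- the per-keyword step ----
theorem pv_step_eq (L : List String) (M : List (String × List String)) (s : Nat)
    (hs : s < L.length) :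
    ∀ (es : List (String × List String)) (st : pvSt), (∀ e ∈ es, e ∈ M) → pvInv L M st s →
      pvRun st (es.flatMap (fun e => if pvMatch e.1 (L[s]'hs) then e.2 else []))
        = pvRun st (es.flatMap (fun e => if pvF L e.1 = some (s : Int) then e.2 else [])) := by
  intro es
  induction es with
  | nil => intro st _ _; rfl
  | cons e es ih =>
    intro st hsub hinv
    have heM : e ∈ M := hsub e (by simp)
    have hsub' : ∀ x ∈ es, x ∈ M := fun x hx => hsub x (by simp [hx])
    simp only [List.flatMap_cons]
    simp only [pvRun, List.foldl_append] at *
    by_cases hm : pvMatch e.1 (L[s]'hs) = true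
    · obtain ⟨i, hFi, hile⟩ := pvF_le_of_match e.1 L 0 s hs hm
      have hFi' : pvF L e.1 = some i := hFi
      by_cases his : i = (s : Int)
      · subst his
        rw [if_pos hm, if_pos hFi']
        exact ih (List.foldl pvB_addStep st e.2) hsub'
          (pvInv_mono L M st _ e.2 hinv)
      · have hilt : i < (s : Int) := by omega
        obtain ⟨j, hjm⟩ := pv_mem_matched L M e heM i hFi'
        have habs : List.foldl pvB_addStep st e.2 = st :=
          pv_abs st e.2 (fun x hx => hinv (i, j, e.2) hjm hilt x hx)
        rw [if_pos hm, if_neg (by simp [hFi', his]), habs]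
        exact ih st hsub' hinv
    · have hFs : ¬ pvF L e.1 = some (s : Int) := by
        intro hF
        obtain ⟨k, hk, hik, hmk⟩ := pvF_some e.1 L 0 (s : Int) hF
        have hks : k = s := by omega
        subst hks
        exact hm hmk
      rw [if_neg (by simpa using hm), if_neg hFs]
      exact ih st hsub' hinv

-- ---- the spine ----
theorem pv_main (L : List String) (M : List (String × List String)) :
    ∀ (R : List String) (s : Nat) (st : pvSt), L.drop s = R → pvInv L M st s →
      pvRun st (R.flatMap (pvAblk M)) = pvRun st (pvBside L M R s) := by
  intro R
  induction R with
  | nil => intro s st _ _; rfl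
  | cons el R' ih =>
    intro s st hdrop hinv
    have hs : s < L.length := by
      have hlen := congrArg List.length hdrop
      simp only [List.length_drop, List.length_cons] at hlen
      omega
    have hel : L[s]'hs = el := by
      have h2 : (List.drop s L)[0]? = some el := by rw [hdrop]; rfl
      rw [List.getElem?_drop, Nat.add_zero, List.getElem?_eq_getElem hs] at h2
      exact Option.some.inj h2
    have hdrop' : L.drop (s + 1) = R' := by
      have h1 : L.drop (s + 1) = (L.drop s).drop 1 := by rw [List.drop_drop]
      rw [h1, hdrop]
      rfl
    simp only [List.flatMap_cons, pvBside]
    simp only [pvRun, List.foldl_append]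
    have hstep : List.foldl pvB_addStep st (pvAblk M el)
        = List.foldl pvB_addStep st (pvBblk L M s) := by
      have h3 := pv_step_eq L M s hs M st (fun _ h => h) hinv
      rw [hel] at h3
      exact h3
    rw [hstep]
    have hinv' : pvInv L M (pvRun st (pvBblk L M s)) ((s : Int) + 1) := by
      intro t ht hlt pf hpf
      rcases (by omega : t.1 < (s : Int) ∨ t.1 = (s : Int)) with hcase | hcase
      · exact pv_mono _ _ _ (hinv t ht hcase pf hpf)
      · obtain ⟨e, heM, hF, h22⟩ := pv_matched_mem L M t ht
        have hpfblk : pf ∈ pvBblk L M s := by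
          unfold pvBblk
          rw [List.mem_flatMap]
          refine ⟨e, heM, ?_⟩
          rw [if_pos (by rw [hF, hcase])]
          exact h22 ▸ hpf
        exact pv_gain _ _ _ hpfblk
    have h4 := ih (s + 1) (pvRun st (pvBblk L M s)) hdrop'
      (by
        intro t ht hlt pf hpf
        exact hinv' t ht (by push_cast at hlt ⊢; omega) pf hpf)
    simpa [pvRun] using h4

-- ---- sort characterization ----
theorem pv_sorted2_lex {α : Type} (xs : List α) (k1 k2 : α → Int) :
    PySem.List.sorted2 xs k1 k2 false
      = PySem.List.sorted xs (fun a => toLex (k1 a, k2 a)) false := by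
  have hb : (fun a b => decide (k1 a < k1 b) || (!decide (k1 b < k1 a) && decide (k2 a < k2 b)))
      = (fun a b => decide ((toLex (k1 a, k2 a) : Lex (Int × Int)) < toLex (k1 b, k2 b))) := by
    funext a b
    by_cases h1 : k1 a < k1 b
    · simp [h1, Prod.Lex.toLex_lt_toLex]
    · by_cases h2 : k1 b < k1 a
      · simp [h1, h2, Prod.Lex.toLex_lt_toLex]
        omega
      · have he : k1 a = k1 b := le_antisymm (not_lt.mp h2) (not_lt.mp h1)
        by_cases h3 : k2 a < k2 b <;>
          simp [h1, h2, h3, Prod.Lex.toLex_lt_toLex, he]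
  unfold PySem.List.sorted2 PySem.List.sorted
  simp only [Bool.false_eq_true, if_false, hb]

theorem pv_flatMap_congr {α β : Type} (f g : α → List β) (l : List α)
    (h : ∀ x ∈ l, f x = g x) : l.flatMap f = l.flatMap g := by
  induction l with
  | nil => rfl
  | cons x l ih =>
    simp only [List.flatMap_cons, h x (by simp), ih (fun y hy => h y (by simp [hy]))]

theorem pv_partition_perm {α : Type} (key : α → Int) :
    ∀ (is : List Int) (l : List α), is.Nodup → (∀ t ∈ l, key t ∈ is) →
      (is.flatMap (fun i => l.filter (fun t => key t = i))).Perm l := by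
  intro is
  induction is with
  | nil =>
    intro l _ hcov
    have : l = [] := List.eq_nil_iff_forall_not_mem.mpr (fun t ht => by simpa using hcov t ht)
    subst this
    simp
  | cons i is ih =>
    intro l hnd hcov
    have hnd' : is.Nodup := (List.nodup_cons.mp hnd).2
    have hi : i ∉ is := (List.nodup_cons.mp hnd).1
    simp only [List.flatMap_cons]
    have hcong : is.flatMap (fun i' => l.filter (fun t => key t = i'))
        = is.flatMap (fun i' => (l.filter (fun t => !decide (key t = i))).filter
            (fun t => key t = i')) := by
      apply pv_flatMap_congr
      intro i' hi'
      rw [List.filter_filter]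
      apply List.filter_congr
      intro t _
      by_cases ht : key t = i'
      · have hne : ¬ i' = i := by rintro rfl; exact hi hi'
        simp [ht, hne]
      · simp [ht]
    rw [hcong]
    have hcov' : ∀ t ∈ l.filter (fun t => !decide (key t = i)), key t ∈ is := by
      intro t ht
      rw [List.mem_filter] at ht
      have hm := hcov t ht.1
      simp only [List.mem_cons] at hm
      rcases hm with h | h
      · exfalso; simp [h] at ht
      · exact h
    have hperm := ih (l.filter (fun t => !decide (key t = i))) hnd' hcov'
    exact (hperm.append_left _).trans (List.filter_append_perm _ l)

theorem pv_matched_j_pairwise (L : List String) (M : List (String × List String)) :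
    (pvMatched L M).Pairwise (fun a b => a.2.1 < b.2.1) := by
  unfold pvMatched
  rw [List.pairwise_filterMap]
  refine (PySem.List.pairwise_lt_enumerate M 0).imp ?_
  intro p q hpq b hb b' hb'
  cases hF : pvF L p.2.1 with
  | none => rw [hF] at hb; simp at hb
  | some i =>
    cases hF' : pvF L q.2.1 with
    | none => rw [hF'] at hb'; simp at hb'
    | some i' =>
      rw [hF] at hb; rw [hF'] at hb'
      simp only [Option.map_some, Option.some_inj] at hb hb'
      rw [← hb, ← hb']
      exact hpq

theorem pv_pw (L : List String) (M : List (String × List String)) :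
    ∀ (ps : List (Int × String)), ps.Pairwise (fun p q => p.1 < q.1) →
      (ps.flatMap (fun p => (pvMatched L M).filter (fun t => t.1 = p.1))).Pairwise
        (fun a b => (toLex (a.1, a.2.1) : Lex (Int × Int)) < toLex (b.1, b.2.1)) := by
  intro ps
  induction ps with
  | nil => intro _; simp
  | cons p ps ih =>
    intro hpw
    rw [List.pairwise_cons] at hpw
    simp only [List.flatMap_cons]
    rw [List.pairwise_append]
    refine ⟨?_, ih hpw.2, ?_⟩
    · have hj := (pv_matched_j_pairwise L M).filter (fun t => decide (t.1 = p.1))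
      refine List.Pairwise.imp_of_mem ?_ hj
      intro a b ha hb hab
      rw [List.mem_filter] at ha hb
      have ha1 : a.1 = p.1 := by simpa using ha.2
      have hb1 : b.1 = p.1 := by simpa using hb.2
      rw [Prod.Lex.toLex_lt_toLex]
      right
      exact ⟨by rw [ha1, hb1], hab⟩
    · intro a ha b hb
      rw [List.mem_filter] at ha
      have ha1 : a.1 = p.1 := by simpa using ha.2
      rw [List.mem_flatMap] at hb
      obtain ⟨q, hq, hbq⟩ := hb
      rw [List.mem_filter] at hbq
      have hb1 : b.1 = q.1 := by simpa using hbq.2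
      rw [Prod.Lex.toLex_lt_toLex]
      left
      rw [ha1, hb1]
      exact hpw.1 q hq

theorem pv_sorted_eq (L : List String) (M : List (String × List String)) :
    PySem.List.sorted2 (pvMatched L M) (fun t => t.1) (fun t => t.2.1) false
      = (PySem.List.enumerate L).flatMap
          (fun p => (pvMatched L M).filter (fun t => t.1 = p.1)) := by
  rw [pv_sorted2_lex]
  apply PySem.List.sorted_eq_of_perm_of_pairwise_lt
  · have hflat : (PySem.List.enumerate L).flatMap
          (fun p => (pvMatched L M).filter (fun t => t.1 = p.1))
        = ((PySem.List.enumerate L).map (fun p => p.1)).flatMap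
            (fun i => (pvMatched L M).filter (fun t => t.1 = i)) := by
      rw [List.flatMap_map]
    rw [hflat]
    refine pv_partition_perm (fun (t : Int × Int × List String) => t.1)
      ((PySem.List.enumerate L).map (fun p => p.1)) (pvMatched L M) ?_ ?_
    · have hpw : ((PySem.List.enumerate L).map (fun p => p.1)).Pairwise (· < ·) := by
        rw [List.pairwise_map]
        exact PySem.List.pairwise_lt_enumerate L 0
      exact hpw.imp ne_of_lt
    · intro t ht
      obtain ⟨e, _, hF, _⟩ := pv_matched_mem L M t ht
      obtain ⟨k, hk, hik, _⟩ := pvF_some e.1 L 0 t.1 hF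
      rw [List.mem_map]
      refine ⟨((0 : Int) + k, L[k]), ?_, by simp [hik]⟩
      rw [PySem.List.mem_enumerate_iff]
      exact ⟨k, hk, rfl⟩
  · exact pv_pw L M (PySem.List.enumerate L) (PySem.List.pairwise_lt_enumerate L 0)

theorem pv_streamB_aux (L : List String) (M : List (String × List String)) :
    ∀ (R : List String) (s : Nat),
      ((PySem.List.enumerate R (s : Int)).flatMap
          (fun p => (pvMatched L M).filter (fun t => t.1 = p.1))).flatMap (fun t => t.2.2)
        = pvBside L M R s := by
  intro R
  induction R with
  | nil => intro s; rfl
  | cons el R' ih =>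
    intro s
    rw [PySem.List.enumerate_cons]
    simp only [List.flatMap_cons, List.flatMap_append, pvBside]
    rw [pv_filter_matched_flat]
    congr 1
    have hc : ((s + 1 : Nat) : Int) = (s : Int) + 1 := by push_cast; ring
    rw [← hc]
    exact ih (s + 1)

theorem pv_streamB_eq (L : List String) (M : List (String × List String)) :
    ((PySem.List.enumerate L).flatMap
        (fun p => (pvMatched L M).filter (fun t => t.1 = p.1))).flatMap (fun t => t.2.2)
      = pvBside L M L 0 := by
  have h := pv_streamB_aux L M L 0
  simpa using h

-- ---- assembly ----
theorem pv_a_eq (ek : List String) (M : List (String × List String)) :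
    find_matching_polish_keywords ek M
      = (pvRun (PySem.Set.empty, []) ((ek.map PySem.Str.lower).flatMap (pvAblk M))).2 := by
  unfold find_matching_polish_keywords
  rw [pvA_collect_eq]
  rfl

theorem pv_b_eq (ek : List String) (M : List (String × List String)) :
    find_matching_polish_keywords_alt ek M
      = (pvRun (PySem.Set.empty, [])
          ((PySem.List.sorted2 (pvMatched (ek.map PySem.Str.lower) M)
              (fun t => t.1) (fun t => t.2.1) false).flatMap (fun t => t.2.2))).2 := by
  simp only [find_matching_polish_keywords_alt]
  rw [pv_foldl_matched (ek.map PySem.Str.lower) (PySem.List.enumerate M) []]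
  rw [List.nil_append, pv_foldl_nested]
  rfl

theorem pv_inv_zero (L : List String) (M : List (String × List String)) (st : pvSt) :
    pvInv L M st 0 := by
  intro t ht hlt pf hpf
  obtain ⟨e, _, hF, _⟩ := pv_matched_mem L M t ht
  obtain ⟨k, hk, hik, _⟩ := pvF_some e.1 L 0 t.1 hF
  omega

-- ===== VERDICT (by name: the statement is the Claim_ definition above) =====
theorem find_matching_polish_keywords_spec : Claim_equal_find_matching_polish_keywords := by
  intro ek M _
  unfold Spec_find_matching_polish_keywords
  rw [pv_a_eq, pv_b_eq]
  rw [pv_sorted_eq, pv_streamB_eq]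
  rw [pv_main (ek.map PySem.Str.lower) M (ek.map PySem.Str.lower) 0 _ (by simp)
      (pv_inv_zero _ M _)]
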